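-- pv_equiv track=rewrite | github.com/Marinerbyte/PDF-SMITH | handlers.py | parse_page_numbers
-- ===== SOURCE A (Python) =====
-- def parse_page_numbers(pages_input, total_pages):
--     """Parse page numbers from user input"""
--     page_numbers = []
--
--     try:
--         # Split by comma
--         parts = pages_input.split(',')
--
--         for part in parts:
--             part = part.strip()
--             if '-' in part:
--                 # Range of pages
--                 start, end = part.split('-')
--                 start, end = int(start.strip()), int(end.strip())
--                 if 1 <= start <= total_pages and 1 <= end <= total_pages and start <= end:
--                     page_numbers.extend(range(start, end + 1))
--             else:
--                 # Single page
--                 page = int(part)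
--                 if 1 <= page <= total_pages:
--                     page_numbers.append(page)
--
--         # Remove duplicates and sort
--         page_numbers = sorted(list(set(page_numbers)))
--
--     except (ValueError, IndexError):
--         return []
--
--     return page_numbers
-- ===== SOURCE B (Python) =====
-- def _part_interval(part, total_pages):
--     """Return a (start, end) interval for one stripped comma-part, or None when the part
--     is syntactically fine but out of range; raise ValueError on malformed input."""
--     if '-' in part:
--         start, end = part.split('-')
--         start, end = int(start.strip()), int(end.strip())
--         if 1 <= start <= total_pages and 1 <= end <= total_pages and start <= end:
--             return (start, end)
--         return None
--     page = int(part)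
--     if 1 <= page <= total_pages:
--         return (page, page)
--     return None
--
--
-- def parse_page_numbers(pages_input, total_pages):
--     """Parse page numbers from user input"""
--     try:
--         intervals = []
--         for part in pages_input.split(','):
--             iv = _part_interval(part.strip(), total_pages)
--             if iv is not None:
--                 intervals.append(iv)
--     except (ValueError, IndexError):
--         return []
--     # merge the validated intervals instead of materialising, deduping and sorting pages
--     intervals.sort(key=lambda iv: iv[0])
--     merged = []
--     cur = None
--     for s, e in intervals:
--         if cur is None:
--             cur = (s, e)
--         elif s <= cur[1]:
--             cur = (cur[0], max(cur[1], e))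
--         else:
--             merged.append(cur)
--             cur = (s, e)
--     if cur is not None:
--         merged.append(cur)
--     return [p for s, e in merged for p in range(s, e + 1)]
-- ===== Notes on version B (the rewrite author's own statement) =====
-- stated objective: alternative
-- what changed: B parses each comma-part into a validated (start,end) interval (singles become (p,p)), sorts and merges the intervals, and expands the merged disjoint intervals in order, instead of A's materialising every page into one list and then doing sorted(list(set(...))); the merged intervals expand directly to the sorted deduplicated page list.
import Mathlib
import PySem

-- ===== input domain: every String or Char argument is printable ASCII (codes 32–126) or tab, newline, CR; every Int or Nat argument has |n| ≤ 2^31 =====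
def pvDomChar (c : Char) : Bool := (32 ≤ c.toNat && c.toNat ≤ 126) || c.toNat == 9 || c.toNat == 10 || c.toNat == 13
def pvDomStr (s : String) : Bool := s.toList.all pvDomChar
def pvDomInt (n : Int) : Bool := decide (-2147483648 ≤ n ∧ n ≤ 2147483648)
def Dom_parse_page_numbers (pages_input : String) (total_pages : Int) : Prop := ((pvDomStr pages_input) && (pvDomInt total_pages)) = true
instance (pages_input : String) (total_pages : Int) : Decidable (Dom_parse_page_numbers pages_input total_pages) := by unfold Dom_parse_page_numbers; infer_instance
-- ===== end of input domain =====

-- B replaces A's pipeline (collect every page, then sorted(list(set(...)))) by interval arithmetic: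
-- parse each part into a validated (start,end) interval, sort-and-merge the intervals, expand once;
-- objective: alternative.

-- ===== PORT A =====
-- one comma-part of A's loop, applied to the already-stripped part; Option result: none = ValueError/IndexError (caught by A's `except`)
def pvPartA (total_pages : Int) (page_numbers : List Int) (part : String) : Option (List Int) :=
  if PySem.Str.isIn "-" part then
    match (PySem.Str.split? part "-").getD [] with   -- separator "-" is nonempty, split? is never none
    | [s0, e0] =>
      match PySem.Int.ofStr? (PySem.Str.strip s0), PySem.Int.ofStr? (PySem.Str.strip e0) with
      | some start, some stop =>
        if 1 ≤ start ∧ start ≤ total_pages ∧ 1 ≤ stop ∧ stop ≤ total_pages ∧ start ≤ stop then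
          some (page_numbers ++ PySem.List.pyRange start (stop + 1) 1)
        else some page_numbers
      | _, _ => none
    | _ => none   -- unpacking `start, end = part.split('-')` with ≠ 2 pieces raises ValueError
  else
    match PySem.Int.ofStr? part with
    | some page => if 1 ≤ page ∧ page ≤ total_pages then some (page_numbers ++ [page]) else some page_numbers
    | none => none

def pvStepA (total_pages : Int) (acc : Option (List Int)) (part0 : String) : Option (List Int) :=
  match acc with
  | none => none
  | some page_numbers => pvPartA total_pages page_numbers (PySem.Str.strip part0)

def parse_page_numbers (pages_input : String) (total_pages : Int) : List Int :=
  match ((PySem.Str.split? pages_input ",").getD []).foldl (pvStepA total_pages) (some []) with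
  | none => []
  | some page_numbers => PySem.List.sorted (PySem.Set.ofList page_numbers) (fun x => x) false

-- ===== PORT B =====
-- range(s, e+1) of one merged interval, B's final expansion unit
def pvExpand (iv : Int × Int) : List Int := PySem.List.pyRange iv.1 (iv.2 + 1) 1

-- Source B's _part_interval: outer none = ValueError raised, some none = part out of range (returns None)
def pvPartIv (total_pages : Int) (part : String) : Option (Option (Int × Int)) :=
  if PySem.Str.isIn "-" part then
    match (PySem.Str.split? part "-").getD [] with
    | [s0, e0] =>
      match PySem.Int.ofStr? (PySem.Str.strip s0), PySem.Int.ofStr? (PySem.Str.strip e0) with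
      | some start, some stop =>
        if 1 ≤ start ∧ start ≤ total_pages ∧ 1 ≤ stop ∧ stop ≤ total_pages ∧ start ≤ stop then
          some (some (start, stop))
        else some none
      | _, _ => none
    | _ => none
  else
    match PySem.Int.ofStr? part with
    | some page => if 1 ≤ page ∧ page ≤ total_pages then some (some (page, page)) else some none
    | none => none

-- the collection loop of Source B (state none = exception already raised)
def pvCollect (total_pages : Int) (acc : Option (List (Int × Int))) (part0 : String) : Option (List (Int × Int)) :=
  match acc with
  | none => none
  | some ivs =>
    match pvPartIv total_pages (PySem.Str.strip part0) with
    | none => none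
    | some none => some ivs
    | some (some iv) => some (ivs ++ [iv])

-- Source B's merge loop body: state = (merged-so-far, current open interval)
def pvMergeStep (st : List (Int × Int) × Option (Int × Int)) (iv : Int × Int) : List (Int × Int) × Option (Int × Int) :=
  match st.2 with
  | none => (st.1, some iv)
  | some cur => if iv.1 ≤ cur.2 then (st.1, some (cur.1, max cur.2 iv.2)) else (st.1 ++ [cur], some iv)

def parse_page_numbers_alt (pages_input : String) (total_pages : Int) : List Int :=
  match ((PySem.Str.split? pages_input ",").getD []).foldl (pvCollect total_pages) (some []) with
  | none => []
  | some intervals =>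
    let st := (PySem.List.sorted intervals (fun iv => iv.1) false).foldl pvMergeStep ([], none)
    let merged := match st.2 with | none => st.1 | some c => st.1 ++ [c]
    merged.flatMap pvExpand

-- ===== PRECONDITION & SPEC =====
def Spec_parse_page_numbers (pages_input : String) (total_pages : Int) (out : List Int) : Prop := out = parse_page_numbers_alt pages_input total_pages
instance (pages_input : String) (total_pages : Int) (out : List Int) : Decidable (Spec_parse_page_numbers pages_input total_pages out) := by unfold Spec_parse_page_numbers; infer_instance

-- ===== CLAIM (what is proved, stated in full; the proofs are below) =====
def Claim_equal_parse_page_numbers : Prop := ∀ (pages_input : String) (total_pages : Int), Dom_parse_page_numbers pages_input total_pages → Spec_parse_page_numbers pages_input total_pages (parse_page_numbers pages_input total_pages)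

-- ===== LEMMAS AND PROOFS =====
-- abbreviation for A's final `sorted(list(set(L)))`
def pvSS (L : List Int) : List Int := PySem.List.sorted (PySem.Set.ofList L) (fun x => x) false

-- recursion-shaped view of Source B's merge loop once the first interval has opened
def pvGo (cur : Int × Int) : List (Int × Int) → List (Int × Int)
  | [] => [cur]
  | iv :: rest => if iv.1 ≤ cur.2 then pvGo (cur.1, max cur.2 iv.2) rest else cur :: pvGo iv rest

def pvFin (st : List (Int × Int) × Option (Int × Int)) : List (Int × Int) :=
  match st.2 with | none => st.1 | some c => st.1 ++ [c]

lemma pvPart_rel (tp : Int) (L : List Int) (part : String) :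
    pvPartA tp L part =
      (pvPartIv tp part).map (fun o => match o with | none => L | some iv => L ++ pvExpand iv) := by
  simp only [pvPartA, pvPartIv]
  split_ifs with hdash
  · split
    · split
      · split_ifs with hc
        · rfl
        · rfl
      · rfl
    · rfl
  · split
    · split_ifs with hc
      · simp [pvExpand, PySem.List.pyRange_one_singleton]
      · rfl
    · rfl

lemma pvFold_rel (tp : Int) (parts : List String) (optI : Option (List (Int × Int))) :
    parts.foldl (pvStepA tp) (optI.map (·.flatMap pvExpand)) =
      (parts.foldl (pvCollect tp) optI).map (·.flatMap pvExpand) := by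
  induction parts generalizing optI with
  | nil => rfl
  | cons part parts ih =>
    rw [List.foldl_cons, List.foldl_cons]
    have hstep : pvStepA tp (optI.map (·.flatMap pvExpand)) part =
        (pvCollect tp optI part).map (·.flatMap pvExpand) := by
      cases optI with
      | none => rfl
      | some ivs =>
        simp only [Option.map_some, pvStepA, pvCollect]
        rw [pvPart_rel tp (ivs.flatMap pvExpand) (PySem.Str.strip part)]
        cases pvPartIv tp (PySem.Str.strip part) with
        | none => rfl
        | some o =>
          cases o with
          | none => rfl
          | some iv => simp
    rw [hstep, ih]

lemma pvPartIv_valid (tp : Int) (part : String) (iv : Int × Int)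
    (h : pvPartIv tp part = some (some iv)) : iv.1 ≤ iv.2 := by
  simp only [pvPartIv] at h
  split at h
  · split at h
    · split at h
      · split_ifs at h with hc
        · cases h; exact hc.2.2.2.2
        · cases h
      · cases h
    · cases h
  · split at h
    · split_ifs at h with hc
      · cases h; exact le_refl _
      · cases h
    · cases h

lemma pvCollect_foldl_none (tp : Int) (parts : List String) :
    parts.foldl (pvCollect tp) none = none := by
  induction parts with
  | nil => rfl
  | cons q qs ih => rw [List.foldl_cons]; exact ih

lemma pvCollect_valid (tp : Int) (parts : List String) (I ivs : List (Int × Int))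
    (hI : ∀ iv ∈ I, iv.1 ≤ iv.2)
    (h : parts.foldl (pvCollect tp) (some I) = some ivs) : ∀ iv ∈ ivs, iv.1 ≤ iv.2 := by
  induction parts generalizing I with
  | nil => cases h; exact hI
  | cons part parts ih =>
    rw [List.foldl_cons] at h
    simp only [pvCollect] at h
    revert h
    split
    · intro h
      rw [pvCollect_foldl_none] at h; cases h
    · intro h; exact ih I hI h
    · rename_i iv hiv
      intro h
      refine ih (I ++ [iv]) ?_ h
      intro x hx
      rcases List.mem_append.mp hx with hx | hx
      · exact hI x hx
      · rcases List.mem_singleton.mp hx with rfl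
        exact pvPartIv_valid tp _ _ hiv

lemma pvFin_foldl (ivs : List (Int × Int)) (res : List (Int × Int)) (cur : Int × Int) :
    pvFin (ivs.foldl pvMergeStep (res, some cur)) = res ++ pvGo cur ivs := by
  induction ivs generalizing res cur with
  | nil => rfl
  | cons iv rest ih =>
    rw [List.foldl_cons]
    simp only [pvMergeStep, pvGo]
    split_ifs with h
    · rw [ih]
    · rw [ih, List.append_assoc]; rfl

lemma pvMem_expand (iv : Int × Int) (p : Int) : p ∈ pvExpand iv ↔ iv.1 ≤ p ∧ p ≤ iv.2 := by
  rw [pvExpand, PySem.List.mem_pyRange_one]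
  omega

lemma pvGo_mem (ivs : List (Int × Int)) (cur : Int × Int) (p : Int)
    (hc : cur.1 ≤ cur.2)
    (hv : ∀ iv ∈ ivs, iv.1 ≤ iv.2)
    (hs : ivs.Pairwise (fun a b => a.1 ≤ b.1))
    (hlo : ∀ iv ∈ ivs, cur.1 ≤ iv.1) :
    p ∈ (pvGo cur ivs).flatMap pvExpand ↔
      (cur.1 ≤ p ∧ p ≤ cur.2) ∨ ∃ iv ∈ ivs, iv.1 ≤ p ∧ p ≤ iv.2 := by
  induction ivs generalizing cur with
  | nil => simp [pvGo, pvMem_expand]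
  | cons iv rest ih =>
    rcases List.pairwise_cons.mp hs with ⟨hiv, hrest⟩
    have hiv12 : iv.1 ≤ iv.2 := hv iv List.mem_cons_self
    have hcuriv : cur.1 ≤ iv.1 := hlo iv List.mem_cons_self
    simp only [pvGo]
    split_ifs with h
    · rw [ih (cur.1, max cur.2 iv.2) (by simp; omega)
        (fun x hx => hv x (List.mem_cons_of_mem _ hx)) hrest
        (fun x hx => hlo x (List.mem_cons_of_mem _ hx))]
      constructor
      · rintro (⟨h1, h2⟩ | hE)
        · by_cases hp : p ≤ cur.2
          · exact Or.inl ⟨h1, hp⟩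
          · refine Or.inr ⟨iv, List.mem_cons_self, by omega, by omega⟩
        · rcases hE with ⟨x, hx, hx1, hx2⟩
          exact Or.inr ⟨x, List.mem_cons_of_mem _ hx, hx1, hx2⟩
      · rintro (⟨h1, h2⟩ | ⟨x, hx, hx1, hx2⟩)
        · exact Or.inl ⟨h1, by simp; omega⟩
        · rcases List.mem_cons.mp hx with rfl | hx'
          · exact Or.inl ⟨by omega, by simp; omega⟩
          · exact Or.inr ⟨x, hx', hx1, hx2⟩
    · rw [List.flatMap_cons, List.mem_append, pvMem_expand,
        ih iv hiv12 (fun x hx => hv x (List.mem_cons_of_mem _ hx)) hrest hiv]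
      constructor
      · rintro (h1 | (h1 | ⟨x, hx, hx1, hx2⟩))
        · exact Or.inl h1
        · exact Or.inr ⟨iv, List.mem_cons_self, h1⟩
        · exact Or.inr ⟨x, List.mem_cons_of_mem _ hx, hx1, hx2⟩
      · rintro (h1 | ⟨x, hx, hx1, hx2⟩)
        · exact Or.inl h1
        · rcases List.mem_cons.mp hx with rfl | hx'
          · exact Or.inr (Or.inl ⟨hx1, hx2⟩)
          · exact Or.inr (Or.inr ⟨x, hx', hx1, hx2⟩)

lemma pvGo_pairwise (ivs : List (Int × Int)) (cur : Int × Int)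
    (hc : cur.1 ≤ cur.2)
    (hv : ∀ iv ∈ ivs, iv.1 ≤ iv.2)
    (hs : ivs.Pairwise (fun a b => a.1 ≤ b.1))
    (hlo : ∀ iv ∈ ivs, cur.1 ≤ iv.1) :
    ((pvGo cur ivs).flatMap pvExpand).Pairwise (· < ·) := by
  induction ivs generalizing cur with
  | nil =>
    simpa [pvGo] using PySem.List.pairwise_lt_pyRange_one (a := cur.1) (b := cur.2 + 1)
  | cons iv rest ih =>
    rcases List.pairwise_cons.mp hs with ⟨hiv, hrest⟩
    have hiv12 : iv.1 ≤ iv.2 := hv iv List.mem_cons_self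
    simp only [pvGo]
    split_ifs with h
    · exact ih (cur.1, max cur.2 iv.2) (by simp; omega)
        (fun x hx => hv x (List.mem_cons_of_mem _ hx)) hrest
        (fun x hx => hlo x (List.mem_cons_of_mem _ hx))
    · rw [List.flatMap_cons]
      refine List.pairwise_append.mpr ⟨?_, ?_, ?_⟩
      · simpa [pvExpand] using PySem.List.pairwise_lt_pyRange_one (a := cur.1) (b := cur.2 + 1)
      · exact ih iv hiv12 (fun x hx => hv x (List.mem_cons_of_mem _ hx)) hrest hiv
      · intro a ha b hb
        rw [pvMem_expand] at ha
        rw [pvGo_mem rest iv b hiv12 (fun x hx => hv x (List.mem_cons_of_mem _ hx)) hrest hiv] at hb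
        rcases hb with ⟨hb1, _⟩ | ⟨x, hx, hx1, _⟩
        · omega
        · have := hiv x hx
          omega

lemma pvStrict_ext (l1 l2 : List Int) (h1 : l1.Pairwise (· < ·)) (h2 : l2.Pairwise (· < ·))
    (hmem : ∀ x, x ∈ l1 ↔ x ∈ l2) : l1 = l2 := by
  have nd1 : l1.Nodup := h1.imp (fun h => ne_of_lt h)
  have nd2 : l2.Nodup := h2.imp (fun h => ne_of_lt h)
  exact List.Perm.eq_of_pairwise' h1 h2 ((List.perm_ext_iff_of_nodup nd1 nd2).mpr hmem)

lemma pvMerge_eq_ss (ivs : List (Int × Int)) (hv : ∀ iv ∈ ivs, iv.1 ≤ iv.2) :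
    (pvFin ((PySem.List.sorted ivs (fun iv => iv.1) false).foldl pvMergeStep ([], none))).flatMap pvExpand
      = pvSS (ivs.flatMap pvExpand) := by
  have hperm : (PySem.List.sorted ivs (fun iv => iv.1) false).Perm ivs :=
    PySem.List.sorted_perm _ _ _
  have hpw : (PySem.List.sorted ivs (fun iv => iv.1) false).Pairwise (fun a b => a.1 ≤ b.1) :=
    PySem.List.sorted_pairwise _ _
  have hmemS : ∀ x, x ∈ PySem.List.sorted ivs (fun iv => iv.1) false ↔ x ∈ ivs :=
    fun x => hperm.mem_iff
  -- membership in pvSS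
  have hssmem : ∀ p : Int, p ∈ pvSS (ivs.flatMap pvExpand) ↔ p ∈ ivs.flatMap pvExpand := by
    intro p
    rw [pvSS, PySem.List.mem_sorted, PySem.Set.mem_ofList]
  have hsspw : (pvSS (ivs.flatMap pvExpand)).Pairwise (· < ·) :=
    PySem.List.sorted_ofList_pairwise_lt (xs := ivs.flatMap pvExpand)
  cases hS : PySem.List.sorted ivs (fun iv => iv.1) false with
  | nil =>
    rw [hS] at hperm
    have hivs : ivs = [] := hperm.symm.eq_nil
    subst hivs
    rfl
  | cons c rest =>
    rw [hS] at hperm hpw hmemS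
    rcases List.pairwise_cons.mp hpw with ⟨hlo, hrest⟩
    have hvS : ∀ iv ∈ c :: rest, iv.1 ≤ iv.2 := fun iv hiv => hv iv ((hmemS iv).mp hiv)
    have hc : c.1 ≤ c.2 := hvS c List.mem_cons_self
    have hvrest : ∀ iv ∈ rest, iv.1 ≤ iv.2 := fun iv hiv => hvS iv (List.mem_cons_of_mem _ hiv)
    have hfold : pvFin ((c :: rest).foldl pvMergeStep ([], none)) = pvGo c rest := by
      rw [List.foldl_cons]
      have : pvMergeStep ([], none) c = ([], some c) := rfl
      rw [this]
      simpa using pvFin_foldl rest [] c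
    rw [hfold]
    refine pvStrict_ext _ _ (pvGo_pairwise rest c hc hvrest hrest hlo) hsspw ?_
    intro p
    rw [pvGo_mem rest c p hc hvrest hrest hlo, hssmem]
    rw [List.mem_flatMap]
    constructor
    · rintro (⟨h1, h2⟩ | ⟨x, hx, hx1, hx2⟩)
      · exact ⟨c, (hmemS c).mp List.mem_cons_self, (pvMem_expand c p).mpr ⟨h1, h2⟩⟩
      · exact ⟨x, (hmemS x).mp (List.mem_cons_of_mem _ hx), (pvMem_expand x p).mpr ⟨hx1, hx2⟩⟩
    · rintro ⟨x, hx, hxe⟩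
      rw [pvMem_expand] at hxe
      rcases List.mem_cons.mp ((hmemS x).mpr hx) with rfl | hx'
      · exact Or.inl hxe
      · exact Or.inr ⟨x, hx', hxe.1, hxe.2⟩

-- ===== VERDICT (by name: the statement is the Claim_ definition above) =====
theorem parse_page_numbers_spec : Claim_equal_parse_page_numbers := by
  intro pages_input total_pages _
  unfold Spec_parse_page_numbers parse_page_numbers parse_page_numbers_alt
  have h := pvFold_rel total_pages ((PySem.Str.split? pages_input ",").getD []) (some [])
  simp only [Option.map_some, List.flatMap_nil] at h
  rw [h]
  cases hI : ((PySem.Str.split? pages_input ",").getD []).foldl (pvCollect total_pages) (some []) with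
  | none => rfl
  | some ivs =>
    simp only [Option.map_some]
    have hv : ∀ iv ∈ ivs, iv.1 ≤ iv.2 :=
      pvCollect_valid total_pages _ [] ivs (by intro iv h; cases h) hI
    exact (pvMerge_eq_ss ivs hv).symm
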